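-- pv_equiv track=rewrite | github.com/jhaaaa/oldestlight | solar_lattice.py | word_lattice
-- ===== SOURCE A (Python) =====
-- def word_lattice(letters: str, words: set) -> list:
--     """
--     DP: find longest sequence of real words tiling the letter stream, L→R.
--     Gaps filled with bracketed raw letters.
--     Returns list of tokens (words or [letter] gaps).
--
--     The main loop fills dp[i] via words (long jumps) and gap-fill (one step back).
--     A second forward pass guarantees dp[n] is always reached.
--     """
--     n = len(letters)
--     lower = letters.lower()
--     dp = [None] * (n + 1)
--     dp[0] = []
--
--     for i in range(n):
--         if dp[i] is None:
--             if i > 0 and dp[i-1] is not None: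
--                 dp[i] = dp[i-1] + [f"[{letters[i-1]}]"]
--             elif i == 0:
--                 dp[i] = []
--             else:
--                 continue
--
--         for length in range(3, min(13, n - i + 1)):
--             candidate = lower[i:i + length]
--             if candidate in words and dp[i + length] is None:
--                 dp[i + length] = dp[i] + [candidate]
--
--     # Second pass: guarantee dp[n] is reachable via single-letter gaps.
--     # The main loop sets dp[i] from dp[i-1] but the final step dp[n-1]→dp[n]
--     # only happens via a word, never via the gap-fill.
--     for i in range(1, n + 1):
--         if dp[i] is None and dp[i-1] is not None:
--             dp[i] = dp[i-1] + [f"[{letters[i-1]}]"]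
--
--     return dp[n] or [f"[{c}]" for c in letters]
-- ===== SOURCE B (Python) =====
-- def word_lattice(letters: str, words: set) -> list:
--     """Pull-style DP: for each position j (left to right) pick its predecessor
--     directly — the longest dictionary word ending at j (equivalently, the
--     smallest start index, which is what first-writer-wins gives A), else a
--     one-letter gap.  Each cell stores a persistent cons-chain (prev_node, token),
--     so no token list is ever copied; the answer is read off the final chain."""
--     n = len(letters)
--     lower = letters.lower()
--     chain = [None] * (n + 1)  # chain[0] stays None (empty chain)
--     for j in range(1, n + 1):
--         for i in range(max(0, j - 12), j - 2):
--             w = lower[i:j]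
--             if w in words:
--                 chain[j] = (chain[i], w)
--                 break
--         else:
--             chain[j] = (chain[j - 1], "[" + letters[j - 1] + "]")
--     out = []
--     node = chain[n]
--     while node is not None:
--         prev, tok = node
--         out.append(tok)
--         node = prev
--     out.reverse()
--     return out
-- ===== Notes on version B (the rewrite author's own statement) =====
-- stated objective: faster
-- what changed: Instead of A's push DP (first-writer-wins writes forward plus a second gap pass, copying a whole token list per cell), B computes each cell's predecessor directly by scanning candidate word starts left-to-right (pull DP), stores a persistent cons-chain (prev, token) per cell, and reads the answer off the final chain once.
import Mathlib
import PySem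

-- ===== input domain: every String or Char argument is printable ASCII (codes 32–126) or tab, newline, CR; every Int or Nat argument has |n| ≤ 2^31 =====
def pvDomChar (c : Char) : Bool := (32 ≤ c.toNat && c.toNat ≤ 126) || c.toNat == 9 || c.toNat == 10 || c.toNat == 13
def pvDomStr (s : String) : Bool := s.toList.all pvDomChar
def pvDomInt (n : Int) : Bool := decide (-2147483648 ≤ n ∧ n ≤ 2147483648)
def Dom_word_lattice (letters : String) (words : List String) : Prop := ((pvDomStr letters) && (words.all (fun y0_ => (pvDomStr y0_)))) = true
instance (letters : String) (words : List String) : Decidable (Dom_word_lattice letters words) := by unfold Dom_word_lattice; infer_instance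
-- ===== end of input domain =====

-- B replaces A's push-style first-writer-wins DP (which copies a whole token list into
-- every cell and needs a second gap pass) by a pull-style DP: each cell picks its own
-- predecessor directly and stores a persistent cons-chain (objective: faster).

-- ===== PORT A =====
-- f"[{c}]"
def pvGapTok (c : Char) : String := "[" ++ String.ofList [c] ++ "]"

-- lower[i:i+len]; with 0 ≤ i, i+len ≤ n the slice is exactly (drop i).take len
def pvCand (lower : List Char) (i len : Nat) : String := String.ofList ((lower.drop i).take len)

-- inner word loop: for length in range(3, min(13, n-i+1)): ...
def pvAInner (lower : List Char) (words : List String) (n i : Nat)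
    (dp : List (Option (List String))) : List (Option (List String)) :=
  (List.range' 3 (min 13 (n - i + 1) - 3)).foldl (fun dp len =>
    if pvCand lower i len ∈ words ∧ dp.getD (i + len) none = none then
      dp.set (i + len) (some ((dp.getD i none).getD [] ++ [pvCand lower i len]))
    else dp) dp

-- one iteration of A's main loop (gap fill from dp[i-1], then the word loop unless dp[i] is still None)
def pvAStep (cs lower : List Char) (words : List String) (n : Nat)
    (dp : List (Option (List String))) (i : Nat) : List (Option (List String)) :=
  let dp :=
    if dp.getD i none = none then
      if 0 < i ∧ dp.getD (i-1) none ≠ none then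
        dp.set i (some ((dp.getD (i-1) none).getD [] ++ [pvGapTok (cs.getD (i-1) ' ')]))
      else dp
    else dp
  if dp.getD i none = none then dp else pvAInner lower words n i dp

-- one iteration of A's second pass
def pvAStep2 (cs : List Char) (dp : List (Option (List String))) (i : Nat) :
    List (Option (List String)) :=
  if dp.getD i none = none ∧ dp.getD (i-1) none ≠ none then
    dp.set i (some ((dp.getD (i-1) none).getD [] ++ [pvGapTok (cs.getD (i-1) ' ')]))
  else dp

def word_lattice (letters : String) (words : List String) : List String :=
  let cs := letters.toList
  let n := cs.length
  let lower := PySem.Chars.lower cs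
  let dp0 := (List.replicate (n+1) (none : Option (List String))).set 0 (some [])
  let dp1 := (List.range n).foldl (pvAStep cs lower words n) dp0
  let dp2 := (List.range' 1 n).foldl (pvAStep2 cs) dp1
  -- return dp[n] or [f"[{c}]" for c in letters]   (falsy = None or [])
  match dp2.getD n none with
  | none => cs.map pvGapTok
  | some l => if l = [] then cs.map pvGapTok else l

-- ===== PORT B =====
-- B's inner 'for i in range(max(0, j-12), j-2): … break / else: gap' choosing cell j's
-- whole chain: first word start wins, otherwise a one-letter gap onto chain[j-1].
-- A chain node (prev, tok) is the cons cell tok :: prev.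
def pvCell (cs lower : List Char) (words : List String)
    (chain : List (List String)) (j : Nat) : List String :=
  match (List.range' (j - 12) ((j - 2) - (j - 12))).findSome? (fun i =>
      if pvCand lower i (j - i) ∈ words then some (pvCand lower i (j - i) :: chain.getD i []) else none) with
  | some c => c
  | none => pvGapTok (cs.getD (j - 1) ' ') :: chain.getD (j - 1) []

-- the 'for j in range(1, n+1)' loop filling chain[1..m] left to right (chain[0] = empty)
def pvBuild (cs lower : List Char) (words : List String) (m : Nat) : List (List String) :=
  (List.range' 1 m).foldl (fun ch j => ch ++ [pvCell cs lower words ch j]) [[]]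

-- the 'while node is not None: out.append(tok); node = prev' readout
def pvWalk : List String → List String → List String
  | [], out => out
  | tok :: prev, out => pvWalk prev (out ++ [tok])

def word_lattice_alt (letters : String) (words : List String) : List String :=
  let cs := letters.toList
  let n := cs.length
  let lower := PySem.Chars.lower cs
  (pvWalk ((pvBuild cs lower words n).getD n []) []).reverse

-- ===== PRECONDITION & SPEC =====
def Spec_word_lattice (letters : String) (words : List String) (out : List String) : Prop := out = word_lattice_alt letters words
instance (letters : String) (words : List String) (out : List String) : Decidable (Spec_word_lattice letters words out) := by unfold Spec_word_lattice; infer_instance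

-- ===== CLAIM (what is proved, stated in full; the proofs are below) =====
def Claim_equal_word_lattice : Prop := ∀ (letters : String) (words : List String), Dom_word_lattice letters words → Spec_word_lattice letters words (word_lattice letters words)

-- ===== LEMMAS AND PROOFS =====

-- B's chain at cell j (stable once written)
def pvC (cs lower : List Char) (words : List String) (j : Nat) : List String :=
  (pvBuild cs lower words j).getD j []

-- the word search of cell j, expressed over pvC
def pvF (cs lower : List Char) (words : List String) (j : Nat) : Option (List String) :=
  (List.range' (j - 12) ((j - 2) - (j - 12))).findSome? (fun i =>
    if pvCand lower i (j - i) ∈ words then some (pvCand lower i (j - i) :: pvC cs lower words i) else none)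

-- "some word start i' < i reaches cell j"
def pvM (lower : List Char) (words : List String) (i j : Nat) : Prop :=
  ∃ i', i' < i ∧ j ≤ i' + 12 ∧ i' + 3 ≤ j ∧ pvCand lower i' (j - i') ∈ words

-- A's invariant before main-loop step i: cells are set exactly below i or when a word
-- start < i reaches them, and a set cell holds the reverse of B's chain.
def pvAInv (cs lower : List Char) (words : List String) (n i : Nat)
    (dp : List (Option (List String))) : Prop :=
  dp.length = n + 1 ∧
  ∀ j, j ≤ n →
    ((j = 0 ∨ j < i ∨ pvM lower words i j) → dp.getD j none = some ((pvC cs lower words j).reverse)) ∧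
    (¬(j = 0 ∨ j < i ∨ pvM lower words i j) → dp.getD j none = none)

-- word writes already performed by step i's inner loop (processed lengths P)
def pvWCond (lower : List Char) (words : List String) (i : Nat) (P : List Nat) (j : Nat) : Prop :=
  ∃ len ∈ P, j = i + len ∧ pvCand lower i len ∈ words

def pvWInv (cs lower : List Char) (words : List String) (n i : Nat) (P : List Nat)
    (dp : List (Option (List String))) : Prop :=
  dp.length = n + 1 ∧
  ∀ j, j ≤ n →
    ((j ≤ i ∨ pvM lower words i j ∨ pvWCond lower words i P j) → dp.getD j none = some ((pvC cs lower words j).reverse)) ∧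
    (¬(j ≤ i ∨ pvM lower words i j ∨ pvWCond lower words i P j) → dp.getD j none = none)

theorem pv_getD_set_self {α : Type} (l : List α) (k : Nat) (v d : α) (h : k < l.length) :
    (l.set k v).getD k d = v := by
  simp [List.getD, h]

theorem pv_getD_set_ne {α : Type} (l : List α) {k j : Nat} (v d : α) (h : j ≠ k) :
    (l.set k v).getD j d = l.getD j d := by
  simp [List.getD, Ne.symm h]

theorem pv_getD_replicate {α : Type} (m j : Nat) (d : α) (a : α) :
    (List.replicate m a).getD j d = if j < m then a else d := by
  by_cases h : j < m <;> simp [List.getD, h]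

theorem pvWalk_eq : ∀ c out : List String, pvWalk c out = out ++ c := by
  intro c
  induction c with
  | nil => intro out; simp [pvWalk]
  | cons t p ih => intro out; simp [pvWalk, ih]

theorem pvBuild_len (cs lower : List Char) (words : List String) (m : Nat) :
    (pvBuild cs lower words m).length = m + 1 := by
  induction m with
  | zero => rfl
  | succ m ih =>
      unfold pvBuild
      rw [List.range'_1_concat, List.foldl_append, List.foldl_cons, List.foldl_nil]
      simp only [List.length_append, List.length_cons, List.length_nil]
      unfold pvBuild at ih
      omega

theorem pvBuild_succ (cs lower : List Char) (words : List String) (m : Nat) :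
    pvBuild cs lower words (m+1) =
      pvBuild cs lower words m ++ [pvCell cs lower words (pvBuild cs lower words m) (m+1)] := by
  have h1 : 1 + m = m + 1 := by omega
  unfold pvBuild
  rw [List.range'_1_concat, List.foldl_append, List.foldl_cons, List.foldl_nil, h1]

theorem pvBuild_getD_mono (cs lower : List Char) (words : List String) :
    ∀ m' m j, j ≤ m → m ≤ m' →
      (pvBuild cs lower words m').getD j [] = (pvBuild cs lower words m).getD j [] := by
  intro m'
  induction m' with
  | zero => intro m j hj hm; interval_cases m; rfl
  | succ m' ih =>
      intro m j hj hm
      by_cases hmm : m = m' + 1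
      · rw [hmm]
      · have hle : m ≤ m' := by omega
        rw [pvBuild_succ, List.getD_append _ _ _ _ (by rw [pvBuild_len]; omega)]
        exact ih m j hj hle

theorem pvC_eq (cs lower : List Char) (words : List String) (m j : Nat) (h : j ≤ m) :
    (pvBuild cs lower words m).getD j [] = pvC cs lower words j := by
  exact pvBuild_getD_mono cs lower words m j j le_rfl h

theorem pv_findSome?_congr {α β : Type} (f g : α → Option β) :
    ∀ l : List α, (∀ x ∈ l, f x = g x) → l.findSome? f = l.findSome? g := by
  intro l
  induction l with
  | nil => intro _; rfl
  | cons a l ih =>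
      intro h
      rw [List.findSome?_cons, List.findSome?_cons, h a (by simp)]
      cases g a with
      | none => exact ih (fun x hx => h x (by simp [hx]))
      | some b => rfl

theorem pv_window_mem (j i' : Nat) :
    i' ∈ List.range' (j - 12) ((j - 2) - (j - 12)) ↔ (j ≤ i' + 12 ∧ i' + 3 ≤ j) := by
  rw [List.mem_range'_1]; omega

theorem pvC_unfold (cs lower : List Char) (words : List String) (j : Nat) (hj : 1 ≤ j) :
    pvC cs lower words j =
      match pvF cs lower words j with
      | some c => c
      | none => pvGapTok (cs.getD (j - 1) ' ') :: pvC cs lower words (j - 1) := by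
  have hj1 : j - 1 + 1 = j := by omega
  have h0 : pvC cs lower words j = (pvBuild cs lower words j).getD j [] := rfl
  rw [h0, ← hj1, pvBuild_succ]
  have hlen : (pvBuild cs lower words (j-1)).length = j - 1 + 1 := pvBuild_len cs lower words (j-1)
  rw [show (pvBuild cs lower words (j-1) ++ [pvCell cs lower words (pvBuild cs lower words (j-1)) (j-1+1)]).getD (j-1+1) []
        = pvCell cs lower words (pvBuild cs lower words (j-1)) (j-1+1) from by
      simp [List.getD, ← hlen]]
  rw [hj1]
  unfold pvCell pvF
  rw [pv_findSome?_congr _ _ _ (fun i hi => ?_)]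
  · rfl
  · rw [pv_window_mem] at hi
    by_cases hw : pvCand lower i (j - i) ∈ words
    · rw [if_pos hw, if_pos hw, pvC_eq cs lower words (j-1) i (by omega)]
    · rw [if_neg hw, if_neg hw]

theorem pvF_none_iff (cs lower : List Char) (words : List String) (j : Nat) :
    pvF cs lower words j = none ↔ ¬ pvM lower words j j := by
  unfold pvF pvM
  rw [List.findSome?_eq_none_iff]
  constructor
  · rintro h ⟨i', _, h2, h3, h4⟩
    have hm := h i' ((pv_window_mem j i').mpr ⟨h2, h3⟩)
    rw [if_pos h4] at hm
    simp at hm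
  · intro h i' hm
    rw [pv_window_mem] at hm
    by_cases hw : pvCand lower i' (j - i') ∈ words
    · exact absurd ⟨i', by omega, hm.1, hm.2, hw⟩ h
    · rw [if_neg hw]

theorem pvFind_range' {β : Type} (f : Nat → Option β) (v : β) :
    ∀ (W a i : Nat), a ≤ i → i < a + W → f i = some v →
      (∀ k, a ≤ k → k < i → f k = none) →
      (List.range' a W).findSome? f = some v := by
  intro W
  induction W with
  | zero => intro a i h1 h2; omega
  | succ W ih =>
      intro a i h1 h2 hv hnone
      rw [List.range'_succ, List.findSome?_cons]
      by_cases hai : a = i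
      · rw [hai, hv]
      · rw [hnone a le_rfl (by omega)]
        exact ih (a+1) i (by omega) (by omega) hv (fun k hk1 hk2 => hnone k (by omega) hk2)

theorem pvF_first (cs lower : List Char) (words : List String) (i j : Nat)
    (hM : ¬ pvM lower words i j) (h12 : j ≤ i + 12) (h3 : i + 3 ≤ j)
    (hw : pvCand lower i (j - i) ∈ words) :
    pvF cs lower words j = some (pvCand lower i (j - i) :: pvC cs lower words i) := by
  unfold pvF
  apply pvFind_range' _ _ ((j-2)-(j-12)) (j-12) i (by omega) (by omega)
  · rw [if_pos hw]
  · intro k hk1 hk2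
    by_cases hkw : pvCand lower k (j - k) ∈ words
    · exact absurd ⟨k, by omega, by omega, by omega, hkw⟩ hM
    · rw [if_neg hkw]

theorem pvC_ne_nil (cs lower : List Char) (words : List String) (j : Nat) (hj : 1 ≤ j) :
    pvC cs lower words j ≠ [] := by
  rw [pvC_unfold cs lower words j hj]
  cases hF : pvF cs lower words j with
  | none => simp
  | some c =>
      obtain ⟨a, _, ha⟩ := List.exists_of_findSome?_eq_some hF
      by_cases hw : pvCand lower a (j - a) ∈ words
      · rw [if_pos hw] at ha
        obtain rfl : pvCand lower a (j - a) :: pvC cs lower words a = c := Option.some.inj ha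
        simp
      · rw [if_neg hw] at ha
        simp at ha

theorem pvWCond_mono (lower : List Char) (words : List String) (i : Nat) (P L : List Nat) (j : Nat)
    (h : pvWCond lower words i P j) : pvWCond lower words i (P ++ L) j := by
  obtain ⟨l, hl, a, b⟩ := h
  exact ⟨l, List.mem_append_left _ hl, a, b⟩

theorem pvWInv_fold (cs lower : List Char) (words : List String) (n i : Nat) (hi : i < n) :
    ∀ (L P : List Nat) (dp : List (Option (List String))),
      (∀ len ∈ L, 3 ≤ len ∧ len ≤ 12 ∧ i + len ≤ n) →
      pvWInv cs lower words n i P dp →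
      pvWInv cs lower words n i (P ++ L)
        (L.foldl (fun dp len =>
          if pvCand lower i len ∈ words ∧ dp.getD (i + len) none = none then
            dp.set (i + len) (some ((dp.getD i none).getD [] ++ [pvCand lower i len]))
          else dp) dp) := by
  intro L
  induction L with
  | nil => intro P dp _ h; simpa using h
  | cons len L ih =>
      intro P dp hL h
      obtain ⟨h3, h12, hin⟩ := hL len (by simp)
      rw [List.foldl_cons]
      have hstep : pvWInv cs lower words n i (P ++ [len])
          (if pvCand lower i len ∈ words ∧ dp.getD (i + len) none = none then
            dp.set (i + len) (some ((dp.getD i none).getD [] ++ [pvCand lower i len]))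
          else dp) := by
        by_cases hc : pvCand lower i len ∈ words ∧ dp.getD (i + len) none = none
        · rw [if_pos hc]
          obtain ⟨hw, hnone⟩ := hc
          have hnc : ¬(i + len ≤ i ∨ pvM lower words i (i+len) ∨ pvWCond lower words i P (i+len)) := by
            intro hcond
            have := (h.2 (i+len) hin).1 hcond
            rw [hnone] at this; simp at this
          have hdpi : dp.getD i none = some ((pvC cs lower words i).reverse) :=
            (h.2 i (by omega)).1 (Or.inl le_rfl)
          have hMn : ¬ pvM lower words i (i+len) := fun hm => hnc (Or.inr (Or.inl hm))
          have hCval : pvC cs lower words (i+len) = pvCand lower i len :: pvC cs lower words i := by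
            have hsub : i + len - i = len := by omega
            have hf := pvF_first cs lower words i (i+len) hMn (by omega) (by omega)
              (by rw [hsub]; exact hw)
            rw [pvC_unfold cs lower words (i+len) (by omega), hf, hsub]
          refine ⟨by rw [List.length_set, h.1], fun j hj => ?_⟩
          by_cases hje : j = i + len
          · subst hje
            refine ⟨fun _ => ?_, fun hn => absurd (Or.inr (Or.inr ⟨len, by simp, rfl, hw⟩)) hn⟩
            rw [pv_getD_set_self _ _ _ _ (by rw [h.1]; omega), hdpi, hCval]
            simp
          · have hget := pv_getD_set_ne dp
              (some ((dp.getD i none).getD [] ++ [pvCand lower i len])) (none : Option (List String)) hje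
            have hcondeq : (j ≤ i ∨ pvM lower words i j ∨ pvWCond lower words i (P ++ [len]) j)
                ↔ (j ≤ i ∨ pvM lower words i j ∨ pvWCond lower words i P j) := by
              constructor
              · rintro (hcj | hcj | ⟨l', hl', hjl, hwl⟩)
                · exact Or.inl hcj
                · exact Or.inr (Or.inl hcj)
                · rcases List.mem_append.mp hl' with hl' | hl'
                  · exact Or.inr (Or.inr ⟨l', hl', hjl, hwl⟩)
                  · simp only [List.mem_singleton] at hl'
                    subst hl'
                    exact absurd hjl hje
              · rintro (hcj | hcj | hcj)
                · exact Or.inl hcj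
                · exact Or.inr (Or.inl hcj)
                · exact Or.inr (Or.inr (pvWCond_mono lower words i P [len] j hcj))
            rw [hget]
            exact ⟨fun hcj => (h.2 j hj).1 (hcondeq.mp hcj),
              fun hcj => (h.2 j hj).2 (fun hc2 => hcj (hcondeq.mpr hc2))⟩
        · rw [if_neg hc]
          refine ⟨h.1, fun j hj => ?_⟩
          have hback : (j ≤ i ∨ pvM lower words i j ∨ pvWCond lower words i P j) →
              (j ≤ i ∨ pvM lower words i j ∨ pvWCond lower words i (P ++ [len]) j) := by
            rintro (hcj | hcj | hcj)
            · exact Or.inl hcj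
            · exact Or.inr (Or.inl hcj)
            · exact Or.inr (Or.inr (pvWCond_mono lower words i P [len] j hcj))
          constructor
          · rintro (hcj | hcj | ⟨l', hl', hjl, hwl⟩)
            · exact (h.2 j hj).1 (Or.inl hcj)
            · exact (h.2 j hj).1 (Or.inr (Or.inl hcj))
            · rcases List.mem_append.mp hl' with hl' | hl'
              · exact (h.2 j hj).1 (Or.inr (Or.inr ⟨l', hl', hjl, hwl⟩))
              · simp only [List.mem_singleton] at hl'
                rw [hl'] at hjl hwl
                subst hjl
                have hne : dp.getD (i+len) none ≠ none := fun hno => hc ⟨hwl, hno⟩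
                have hold : (i+len ≤ i ∨ pvM lower words i (i+len) ∨ pvWCond lower words i P (i+len)) := by
                  by_contra hno
                  exact hne ((h.2 (i+len) hin).2 hno)
                exact (h.2 (i+len) hin).1 hold
          · intro hn
            exact (h.2 j hj).2 (fun hc2 => hn (hback hc2))
      have hres := ih (P ++ [len]) _ (fun l hl => hL l (by simp [hl])) hstep
      simpa using hres

theorem pvWInv_init (cs lower : List Char) (words : List String) (n i : Nat)
    (dp : List (Option (List String)))
    (hlen : dp.length = n + 1)
    (hdi : dp.getD i none = some ((pvC cs lower words i).reverse))
    (hrest : ∀ j, j ≤ n → j ≠ i →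
      ((j = 0 ∨ j < i ∨ pvM lower words i j) → dp.getD j none = some ((pvC cs lower words j).reverse)) ∧
      (¬(j = 0 ∨ j < i ∨ pvM lower words i j) → dp.getD j none = none)) :
    pvWInv cs lower words n i [] dp := by
  refine ⟨hlen, fun j hj => ?_⟩
  by_cases hji : j = i
  · subst hji
    exact ⟨fun _ => hdi, fun hn => absurd (Or.inl le_rfl) hn⟩
  · constructor
    · rintro (hc | hc | hc)
      · exact (hrest j hj hji).1 (Or.inr (Or.inl (by omega)))
      · exact (hrest j hj hji).1 (Or.inr (Or.inr hc))
      · exact absurd hc (by rintro ⟨l, hl, _, _⟩; simp at hl)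
    · intro hn
      refine (hrest j hj hji).2 (fun hc => hn ?_)
      rcases hc with hc | hc | hc
      · exact Or.inl (by omega)
      · exact Or.inl (by omega)
      · exact Or.inr (Or.inl hc)

theorem pvAStep_inv (cs lower : List Char) (words : List String) (n i : Nat) (hi : i < n)
    (dp : List (Option (List String))) (h : pvAInv cs lower words n i dp) :
    pvAInv cs lower words n (i+1) (pvAStep cs lower words n dp i) := by
  have hLbound : ∀ len ∈ List.range' 3 (min 13 (n - i + 1) - 3), 3 ≤ len ∧ len ≤ 12 ∧ i + len ≤ n := by
    intro len hl; rw [List.mem_range'_1] at hl; omega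
  have hcondnew : ∀ j, j ≤ n →
      ((j ≤ i ∨ pvM lower words i j ∨ pvWCond lower words i (([] : List Nat) ++ List.range' 3 (min 13 (n - i + 1) - 3)) j)
        ↔ (j = 0 ∨ j < i + 1 ∨ pvM lower words (i+1) j)) := by
    intro j hj
    simp only [List.nil_append]
    constructor
    · rintro (h1 | ⟨i', h1, h2, h3, h4⟩ | ⟨len, hl, rfl, hw⟩)
      · right; left; omega
      · exact Or.inr (Or.inr ⟨i', by omega, h2, h3, h4⟩)
      · rw [List.mem_range'_1] at hl
        refine Or.inr (Or.inr ⟨i, by omega, by omega, by omega, ?_⟩)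
        have hsub : i + len - i = len := by omega
        rw [hsub]; exact hw
    · rintro (h1 | h1 | ⟨i', h1, h2, h3, h4⟩)
      · left; omega
      · left; omega
      · by_cases hii : i' < i
        · exact Or.inr (Or.inl ⟨i', hii, h2, h3, h4⟩)
        · have hieq : i' = i := by omega
          subst hieq
          exact Or.inr (Or.inr ⟨j - i', List.mem_range'_1.mpr (by omega), by omega, h4⟩)
  have hfinish : ∀ dp' : List (Option (List String)), pvWInv cs lower words n i [] dp' →
      pvAInv cs lower words n (i+1) (pvAInner lower words n i dp') := by
    intro dp' hW
    have hres := pvWInv_fold cs lower words n i hi _ [] dp' hLbound hW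
    unfold pvAInner
    refine ⟨hres.1, fun j hj => ?_⟩
    have hcj := hcondnew j hj
    exact ⟨fun hc => (hres.2 j hj).1 (hcj.mpr hc),
      fun hc => (hres.2 j hj).2 (fun hc2 => hc (hcj.mp hc2))⟩
  unfold pvAStep
  by_cases h0 : dp.getD i none = none
  · have hio : ¬(i = 0 ∨ i < i ∨ pvM lower words i i) := by
      intro hc
      have := (h.2 i (by omega)).1 hc
      rw [h0] at this; simp at this
    have hi0 : i ≠ 0 := fun he => hio (Or.inl he)
    have hprev : dp.getD (i-1) none = some ((pvC cs lower words (i-1)).reverse) :=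
      (h.2 (i-1) (by omega)).1 (Or.inr (Or.inl (by omega)))
    have hMii : ¬ pvM lower words i i := fun hm => hio (Or.inr (Or.inr hm))
    have hCi : pvC cs lower words i = pvGapTok (cs.getD (i-1) ' ') :: pvC cs lower words (i-1) := by
      rw [pvC_unfold cs lower words i (by omega), (pvF_none_iff cs lower words i).mpr hMii]
    have hgapcond : 0 < i ∧ dp.getD (i-1) none ≠ none := ⟨by omega, by rw [hprev]; simp⟩
    rw [if_pos h0, if_pos hgapcond]
    have hdp1i : (dp.set i (some ((dp.getD (i-1) none).getD [] ++ [pvGapTok (cs.getD (i-1) ' ')]))).getD i none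
        = some ((pvC cs lower words i).reverse) := by
      rw [pv_getD_set_self _ _ _ _ (by rw [h.1]; omega), hprev, hCi]
      simp
    have hnn : ¬((dp.set i (some ((dp.getD (i-1) none).getD [] ++ [pvGapTok (cs.getD (i-1) ' ')]))).getD i none = none) := by
      rw [hdp1i]; simp
    rw [if_neg hnn]
    refine hfinish _ (pvWInv_init cs lower words n i _ (by rw [List.length_set, h.1]) hdp1i ?_)
    intro j hj hji
    have hg := pv_getD_set_ne dp
      (some ((dp.getD (i-1) none).getD [] ++ [pvGapTok (cs.getD (i-1) ' ')])) (none : Option (List String)) hji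
    rw [hg]
    exact h.2 j hj
  · rw [if_neg h0, if_neg h0]
    have hci : (i = 0 ∨ i < i ∨ pvM lower words i i) := by
      by_contra hn
      exact h0 ((h.2 i (by omega)).2 hn)
    have hdpi : dp.getD i none = some ((pvC cs lower words i).reverse) := (h.2 i (by omega)).1 hci
    exact hfinish _ (pvWInv_init cs lower words n i _ h.1 hdpi (fun j hj _ => h.2 j hj))

theorem pvMain_inv (cs lower : List Char) (words : List String) (n : Nat) (hn : n = cs.length) :
    ∀ m, m ≤ n → pvAInv cs lower words n m
      ((List.range m).foldl (pvAStep cs lower words n)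
        ((List.replicate (n+1) (none : Option (List String))).set 0 (some []))) := by
  intro m
  induction m with
  | zero =>
      intro _
      rw [List.range_zero, List.foldl_nil]
      refine ⟨by simp, fun j hj => ?_⟩
      constructor
      · rintro (rfl | hc | ⟨i', hi', _⟩)
        · rw [pv_getD_set_self _ _ _ _ (by simp)]
          rfl
        · omega
        · omega
      · intro hno
        have hj0 : j ≠ 0 := fun he => hno (Or.inl he)
        rw [pv_getD_set_ne _ _ _ hj0, pv_getD_replicate]
        rw [if_pos (by omega)]
  | succ m ih =>
      intro hm
      rw [List.range_succ, List.foldl_append, List.foldl_cons, List.foldl_nil]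
      exact pvAStep_inv cs lower words n m (by omega) _ (ih (by omega))

theorem pvPass2_nop (cs : List Char) :
    ∀ (m : Nat) (dp : List (Option (List String))),
      (∀ j, 1 ≤ j → j ≤ m → dp.getD j none ≠ none) →
      (List.range' 1 m).foldl (pvAStep2 cs) dp = dp := by
  intro m
  induction m with
  | zero => intro dp _; rfl
  | succ m ih =>
      intro dp h
      rw [List.range'_1_concat, List.foldl_append, List.foldl_cons, List.foldl_nil]
      rw [ih dp (fun j h1 h2 => h j h1 (by omega))]
      unfold pvAStep2
      rw [if_neg (fun hc => h (1+m) (by omega) (by omega) hc.1)]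

-- ===== VERDICT (by name: the statement is the Claim_ definition above) =====
theorem word_lattice_spec : Claim_equal_word_lattice := by
  intro letters words _
  unfold Spec_word_lattice word_lattice word_lattice_alt
  dsimp only
  set cs := letters.toList with hcs
  set n := cs.length with hn
  set lower := PySem.Chars.lower cs with hlower
  by_cases hn0 : n = 0
  · have hcsnil : cs = [] := List.eq_nil_of_length_eq_zero (by omega)
    rw [hn0, hcsnil]
    rfl
  · have hn1 : 1 ≤ n := by omega
    have hInv := pvMain_inv cs lower words n hn n le_rfl
    set dp1 := (List.range n).foldl (pvAStep cs lower words n)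
      ((List.replicate (n+1) (none : Option (List String))).set 0 (some [])) with hdp1
    have hsetlt : ∀ j, 1 ≤ j → j ≤ n - 1 → dp1.getD j none ≠ none := by
      intro j h1 h2
      rw [(hInv.2 j (by omega)).1 (Or.inr (Or.inl (by omega)))]
      simp
    have hsplit : List.range' 1 n = List.range' 1 (n-1) ++ [n] := by
      conv_lhs => rw [show n = (n-1)+1 by omega]
      rw [List.range'_1_concat, show 1 + (n-1) = n by omega]
    rw [hsplit, List.foldl_append, pvPass2_nop cs (n-1) dp1 hsetlt, List.foldl_cons, List.foldl_nil]
    have hgoalB : (pvBuild cs lower words n).getD n [] = pvC cs lower words n := rfl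
    cases hdpn : dp1.getD n none with
    | some l =>
        have hcond : (n = 0 ∨ n < n ∨ pvM lower words n n) := by
          by_contra hc
          rw [(hInv.2 n le_rfl).2 hc] at hdpn
          simp at hdpn
        have hval := (hInv.2 n le_rfl).1 hcond
        rw [hdpn] at hval
        obtain rfl : l = (pvC cs lower words n).reverse := Option.some.inj hval
        have hstep2 : pvAStep2 cs dp1 n = dp1 := by
          unfold pvAStep2
          rw [if_neg (by rw [hdpn]; simp)]
        rw [hstep2, hdpn]
        dsimp only
        rw [if_neg (by simp [pvC_ne_nil cs lower words n hn1])]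
        rw [hgoalB, pvWalk_eq]
        simp
    | none =>
        have hMnn : ¬ pvM lower words n n := by
          intro hm
          have := (hInv.2 n le_rfl).1 (Or.inr (Or.inr hm))
          rw [hdpn] at this
          simp at this
        have hprev : dp1.getD (n-1) none = some ((pvC cs lower words (n-1)).reverse) := by
          refine (hInv.2 (n-1) (by omega)).1 ?_
          by_cases h1 : n = 1
          · exact Or.inl (by omega)
          · exact Or.inr (Or.inl (by omega))
        have hCn : pvC cs lower words n = pvGapTok (cs.getD (n-1) ' ') :: pvC cs lower words (n-1) := by
          rw [pvC_unfold cs lower words n hn1, (pvF_none_iff cs lower words n).mpr hMnn]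
        have hstep2 : pvAStep2 cs dp1 n
            = dp1.set n (some ((dp1.getD (n-1) none).getD [] ++ [pvGapTok (cs.getD (n-1) ' ')])) := by
          unfold pvAStep2
          rw [if_pos ⟨hdpn, by rw [hprev]; simp⟩]
        rw [hstep2]
        have hval : (dp1.set n (some ((dp1.getD (n-1) none).getD [] ++ [pvGapTok (cs.getD (n-1) ' ')]))).getD n none
            = some ((pvC cs lower words n).reverse) := by
          rw [pv_getD_set_self _ _ _ _ (by rw [hInv.1]; omega), hprev, hCn]
          simp
        rw [hval]
        dsimp only
        rw [if_neg (by simp [pvC_ne_nil cs lower words n hn1])]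
        rw [hgoalB, pvWalk_eq]
        simp
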